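-- pv_equiv track=rewrite | github.com/zigakleine/conditioned_symbollic_music_diffusion_preprocessing | scraping/scraping.py | split_on_char
-- ===== SOURCE A (Python) =====
-- def split_on_char(gamename_split, ch):
--     appended_num = 0
--     for (i, gs) in enumerate(gamename_split.copy()):
--         append_index = i + appended_num
--         if ch in gs:
--             new_split = gs.split(ch)
--             gamename_split.remove(gs)
--             for ns in new_split:
--                 gamename_split.insert(append_index, ns)
--                 appended_num += 1
--                 append_index += 1
--             appended_num -= 1
--     return gamename_split
-- ===== SOURCE B (Python) =====
-- def split_on_char(gamename_split, ch):
--     # One-pass flatten: split every element and write the result back in place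
--     # (same in-place mutation and returned object as the original).
--     gamename_split[:] = [piece for gs in gamename_split for piece in gs.split(ch)]
--     return gamename_split
-- ===== Notes on version B (the rewrite author's own statement) =====
-- stated objective: simpler
-- what changed: A repeatedly mutates the list with remove/insert and hand-maintained shifting indices; B builds the whole result in one flat comprehension over the splits and assigns it back with a single slice assignment.
import Mathlib
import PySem

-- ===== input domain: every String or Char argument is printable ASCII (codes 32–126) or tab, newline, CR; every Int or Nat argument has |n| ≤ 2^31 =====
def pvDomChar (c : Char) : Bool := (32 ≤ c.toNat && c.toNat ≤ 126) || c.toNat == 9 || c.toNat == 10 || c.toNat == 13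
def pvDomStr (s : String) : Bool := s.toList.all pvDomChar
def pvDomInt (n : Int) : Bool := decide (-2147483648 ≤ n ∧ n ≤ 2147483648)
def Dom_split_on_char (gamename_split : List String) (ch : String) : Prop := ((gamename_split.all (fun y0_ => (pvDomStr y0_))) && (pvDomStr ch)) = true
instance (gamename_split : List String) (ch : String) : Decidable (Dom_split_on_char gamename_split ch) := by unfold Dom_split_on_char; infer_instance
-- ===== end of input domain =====

-- B replaces A's remove/insert index bookkeeping by one flat pass over the splits;
-- both Pythons mutate the argument list in place and return it (same mutation), the
-- equivalence proved here is about the returned value.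

-- ===== PORT A =====
def split_on_char (gamename_split : List String) (ch : String) : List String :=
  ((PySem.List.enumerate gamename_split).foldl
    (fun (st : List String × Int) (p : Int × String) =>
      if PySem.Str.isIn ch p.2 then
        -- gs.split(ch): raises only for ch = "", excluded by Pre_; fallback unreachable there
        let newSplit := (PySem.Str.split? p.2 ch).getD [p.2]
        -- gamename_split.remove(gs): gs is always present; fallback unreachable
        let cur := (PySem.List.remove? st.1 p.2).getD st.1
        let res := newSplit.foldl
          (fun (st2 : List String × Int × Int) ns =>
            (PySem.List.insert st2.1 st2.2.1 ns, st2.2.1 + 1, st2.2.2 + 1))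
          (cur, p.1 + st.2, st.2)
        (res.1, res.2.2 - 1)
      else st)
    (gamename_split, 0)).1

-- ===== PORT B =====
def split_on_char_alt (gamename_split : List String) (ch : String) : List String :=
  gamename_split.flatMap (fun gs => (PySem.Str.split? gs ch).getD [gs])

-- ===== PRECONDITION & SPEC =====
-- Pre_ excludes only ch = "" on a nonempty list, where Python's str.split raises ValueError in both A and B.
def Pre_split_on_char (gamename_split : List String) (ch : String) : Prop :=
  gamename_split = [] ∨ ch ≠ ""
instance (gamename_split : List String) (ch : String) : Decidable (Pre_split_on_char gamename_split ch) := by unfold Pre_split_on_char; infer_instance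

def pvWitness_split_on_char : List String × String := (["a,b", "c", ",", ""], ",")

def Spec_split_on_char (gamename_split : List String) (ch : String) (out : List String) : Prop := out = split_on_char_alt gamename_split ch
instance (gamename_split : List String) (ch : String) (out : List String) : Decidable (Spec_split_on_char gamename_split ch out) := by unfold Spec_split_on_char; infer_instance

-- ===== CLAIM (what is proved, stated in full; the proofs are below) =====
def Claim_equal_split_on_char : Prop := ∀ (gamename_split : List String) (ch : String), Dom_split_on_char gamename_split ch → Pre_split_on_char gamename_split ch → Spec_split_on_char gamename_split ch (split_on_char gamename_split ch)

-- ===== LEMMAS AND PROOFS =====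

theorem pv_go_no_occ (sep : List Char) : ∀ (fuel : Nat) (l cur : List Char) (acc : List (List Char)),
    l.length < fuel → ¬ sep <:+: l →
    PySem.Chars.splitOn.go sep fuel l cur acc = acc.reverse ++ [cur.reverse ++ l] := by
  intro fuel
  induction fuel with
  | zero => intro l cur acc h; omega
  | succ n ih =>
    intro l cur acc h hno
    cases l with
    | nil => rw [PySem.Chars.splitOn.go.eq_def]; simp
    | cons c rest =>
      rw [PySem.Chars.splitOn.go.eq_def]
      have hpre : sep.isPrefixOf (c :: rest) = false := by
        by_contra hx
        exact hno ((List.isPrefixOf_iff_prefix.mp (by simpa using hx)).isInfix)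
      simp only [hpre]
      rw [if_neg (by simp)]
      rw [ih rest (c :: cur) acc (by simpa using Nat.lt_of_succ_lt_succ h)
        (fun hi => hno (hi.trans (List.suffix_cons c rest).isInfix))]
      simp

theorem pv_splitOn_no_occ (s sep : List Char) (h : ¬ sep <:+: s) :
    PySem.Chars.splitOn s sep = [s] := by
  unfold PySem.Chars.splitOn
  rw [pv_go_no_occ sep (s.length + 1) s [] [] (by omega) h]
  simp

theorem pv_go_nil (sep cur : List Char) (acc : List (List Char)) (n : Nat) :
    PySem.Chars.splitOn.go sep (n+1) [] cur acc = (cur.reverse :: acc).reverse := by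
  rw [PySem.Chars.splitOn.go.eq_def]

theorem pv_go_cons (sep : List Char) (c : Char) (rest cur : List Char) (acc : List (List Char)) (n : Nat) :
    PySem.Chars.splitOn.go sep (n+1) (c :: rest) cur acc =
      (if sep.isPrefixOf (c :: rest) = true then
        PySem.Chars.splitOn.go sep n (List.drop sep.length (c :: rest)) [] (cur.reverse :: acc)
       else PySem.Chars.splitOn.go sep n rest (c :: cur) acc) := by
  rw [PySem.Chars.splitOn.go.eq_def]

theorem pv_go_pieces (sep : List Char) (hsep : sep ≠ []) :
    ∀ (fuel : Nat) (l cur : List Char) (acc : List (List Char)),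
    l.length < fuel →
    (∀ p ∈ acc, ¬ sep <:+: p) →
    (∀ a b, cur.reverse = a ++ b → b ≠ [] → ¬ sep <+: (b ++ l)) →
    ∀ p ∈ PySem.Chars.splitOn.go sep fuel l cur acc, ¬ sep <:+: p := by
  intro fuel
  induction fuel with
  | zero => intro l cur acc h; omega
  | succ n ih =>
    intro l cur acc h hacc hcur
    have hcr : ¬ sep <:+: cur.reverse := by
      rintro ⟨s, t, hst⟩
      exact hcur s (sep ++ t) (by rw [← hst]; simp) (by simp [hsep])
        (by simp)
    cases l with
    | nil =>
      rw [pv_go_nil]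
      intro p hp
      simp only [List.mem_reverse, List.mem_cons] at hp
      rcases hp with rfl | hp
      · exact hcr
      · exact hacc p hp
    | cons c rest =>
      rw [pv_go_cons]
      by_cases hpre : sep.isPrefixOf (c :: rest) = true
      · rw [if_pos hpre]
        refine ih _ [] _ ?_ ?_ ?_
        · have h1 : 1 ≤ sep.length := List.length_pos_iff.mpr hsep
          simp only [List.length_drop, List.length_cons] at *
          omega
        · intro p hp
          simp only [List.mem_cons] at hp
          rcases hp with rfl | hp
          · exact hcr
          · exact hacc p hp
        · intro a b hab hb
          simp at hab
          exact absurd hab.2 hb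
      · rw [if_neg hpre]
        refine ih rest (c :: cur) acc (by simp at h ⊢; omega) hacc ?_
        intro a b hab hb
        rcases List.eq_nil_or_concat b with rfl | ⟨b₀, c', rfl⟩
        · exact absurd rfl hb
        · have h2 : c' :: (a ++ b₀).reverse = c :: cur := by
            have := congrArg List.reverse hab
            simpa [List.reverse_append] using this.symm
          have hc : c' = c := (List.cons.injEq _ _ _ _ ▸ h2).1
          have hc2 : cur.reverse = a ++ b₀ := by
            have h3 := (List.cons.injEq _ _ _ _ ▸ h2).2
            have := congrArg List.reverse h3
            simpa using this.symm
          rcases List.eq_nil_or_concat b₀ with rfl | hb₀ne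
          · intro hp
            subst hc
            exact hpre (List.isPrefixOf_iff_prefix.mpr (by simpa using hp))
          · have hb0 : b₀ ≠ [] := by rcases hb₀ne with ⟨x, y, rfl⟩; simp
            intro hp
            refine hcur a b₀ hc2 hb0 ?_
            subst hc
            simpa [List.append_assoc] using hp

theorem pv_splitOn_pieces (s sep : List Char) (hsep : sep ≠ []) :
    ∀ p ∈ PySem.Chars.splitOn s sep, ¬ sep <:+: p := by
  unfold PySem.Chars.splitOn
  refine pv_go_pieces sep hsep (s.length + 1) s [] [] (by omega) (by simp) ?_
  intro a b hab hb
  simp at hab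
  exact absurd hab.2 hb
theorem pv_remove_append {pre rest : List String} (gs : String) (h : gs ∉ pre) :
    PySem.List.remove? (pre ++ gs :: rest) gs = some (pre ++ rest) := by
  induction pre with
  | nil => simp [PySem.List.remove?_cons_self]
  | cons x t ih =>
    simp only [List.mem_cons, not_or] at h
    rw [List.cons_append,
      PySem.List.remove?_cons_of_ne (t ++ gs :: rest) (fun he : x = gs => h.1 he.symm),
      ih h.2]
    rfl

theorem pv_insert_fold (pieces : List String) : ∀ (pre rest : List String) (a : Int),
    pieces.foldl
      (fun (st2 : List String × Int × Int) ns =>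
        (PySem.List.insert st2.1 st2.2.1 ns, st2.2.1 + 1, st2.2.2 + 1))
      (pre ++ rest, (pre.length : Int), a)
    = (pre ++ pieces ++ rest, (pre.length : Int) + pieces.length, a + pieces.length) := by
  induction pieces with
  | nil => intro pre rest a; simp
  | cons ns t ih =>
    intro pre rest a
    simp only [List.foldl_cons]
    have hins : PySem.List.insert (pre ++ rest) (pre.length : Int) ns = pre ++ ns :: rest := by
      rw [PySem.List.insert_natCast (pre ++ rest) pre.length ns (by simp)]
      simp
    rw [hins]
    have h2 := ih (pre ++ [ns]) rest (a + 1)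
    have h3 : ((pre ++ [ns]).length : Int) = (pre.length : Int) + 1 := by simp
    rw [h3] at h2
    simp only [List.append_assoc, List.singleton_append] at h2
    rw [h2]
    refine Prod.ext (by simp) (Prod.ext ?_ ?_) <;> simp <;> ring


theorem pv_F_pieces (ch : String) (hch : ch ≠ "") (gs : String) :
    ∀ x ∈ (PySem.Str.split? gs ch).getD [gs], PySem.Str.isIn ch x = false := by
  intro x hx
  have hne : ch.toList ≠ [] := by simp [hch]
  have hemp : ch.toList.isEmpty = false := by simp [hne]
  simp only [PySem.Str.split?, PySem.Chars.split?, hemp, Bool.false_eq_true, if_false,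
    Option.map_some, Option.getD_some, List.mem_map] at hx
  obtain ⟨p, hp, rfl⟩ := hx
  simp only [PySem.Str.isIn, PySem.Chars.isIn_eq_false_iff]
  simpa using pv_splitOn_pieces gs.toList ch.toList hne p hp

theorem pv_F_no (ch : String) (hch : ch ≠ "") (gs : String) (h : PySem.Str.isIn ch gs = false) :
    (PySem.Str.split? gs ch).getD [gs] = [gs] := by
  have hne : ch.toList ≠ [] := by simp [hch]
  have hemp : ch.toList.isEmpty = false := by simp [hne]
  have hno : ¬ ch.toList <:+: gs.toList := by
    simpa only [PySem.Str.isIn, PySem.Chars.isIn_eq_false_iff] using h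
  simp [PySem.Str.split?, PySem.Chars.split?, hemp, pv_splitOn_no_occ _ _ hno]

theorem pv_loop_inv (ch : String) (hch : ch ≠ "") : ∀ (rest pre : List String) (k : Nat),
    (∀ x ∈ pre, PySem.Str.isIn ch x = false) →
    ((PySem.List.enumerate rest (k : Int)).foldl
      (fun (st : List String × Int) (p : Int × String) =>
        if PySem.Str.isIn ch p.2 then
          let newSplit := (PySem.Str.split? p.2 ch).getD [p.2]
          let cur := (PySem.List.remove? st.1 p.2).getD st.1
          let res := newSplit.foldl
            (fun (st2 : List String × Int × Int) ns =>
              (PySem.List.insert st2.1 st2.2.1 ns, st2.2.1 + 1, st2.2.2 + 1))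
            (cur, p.1 + st.2, st.2)
          (res.1, res.2.2 - 1)
        else st)
      (pre ++ rest, (pre.length : Int) - (k : Int))).1
    = pre ++ rest.flatMap (fun gs => (PySem.Str.split? gs ch).getD [gs]) := by
  intro rest
  induction rest with
  | nil => intro pre k _; simp [PySem.List.enumerate]
  | cons gs rest' ih =>
    intro pre k hpre
    rw [PySem.List.enumerate_cons, List.foldl_cons]
    by_cases hIn : PySem.Str.isIn ch gs = true
    · simp only [hIn, if_true]
      have hnotmem : gs ∉ pre := by
        intro hm
        have h1 := hpre gs hm
        simp only [PySem.Str.isIn] at h1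
        simp [PySem.Str.isIn, h1] at hIn
      rw [pv_remove_append gs hnotmem, Option.getD_some]
      have harith : (k : Int) + ((pre.length : Int) - (k : Int)) = (pre.length : Int) := by ring
      rw [harith, pv_insert_fold]
      have hk1 : ((k : Nat) : Int) + 1 = (((k+1 : Nat)) : Int) := by push_cast; ring
      rw [hk1]
      have hnext := ih (pre ++ (PySem.Str.split? gs ch).getD [gs]) (k+1)
        (by intro x hx
            rcases List.mem_append.mp hx with hx | hx
            · exact hpre x hx
            · exact pv_F_pieces ch hch gs x hx)
      simp only [List.length_append, List.append_assoc] at hnext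
      rw [List.append_assoc, List.flatMap_cons, ← List.append_assoc]
      rw [← hnext]
      congr 3
      · simp [List.append_assoc]
      · simp only []
        push_cast
        ring
    · simp only [hIn, Bool.false_eq_true, if_false]
      have hIn' : PySem.Str.isIn ch gs = false := by simpa using hIn
      have := ih (pre ++ [gs]) (k+1)
        (by intro x hx
            rcases List.mem_append.mp hx with hx | hx
            · exact hpre x hx
            · simp at hx; subst hx; exact hIn')
      simp only [List.length_append, List.length_singleton] at this
      simp only [List.append_assoc, List.singleton_append] at this
      have harith : (pre.length : Int) - (k : Int) = ((pre.length + 1 : Nat) : Int) - ((k+1 : Nat) : Int) := by push_cast; ring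
      have hk1 : ((k : Nat) : Int) + 1 = (((k+1 : Nat)) : Int) := by push_cast; ring
      rw [harith, hk1, this]
      simp [pv_F_no ch hch gs hIn']

theorem pv_main : ∀ (gamename_split : List String) (ch : String),
    (gamename_split = [] ∨ ch ≠ "") →
    ((PySem.List.enumerate gamename_split).foldl
      (fun (st : List String × Int) (p : Int × String) =>
        if PySem.Str.isIn ch p.2 then
          let newSplit := (PySem.Str.split? p.2 ch).getD [p.2]
          let cur := (PySem.List.remove? st.1 p.2).getD st.1
          let res := newSplit.foldl
            (fun (st2 : List String × Int × Int) ns =>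
              (PySem.List.insert st2.1 st2.2.1 ns, st2.2.1 + 1, st2.2.2 + 1))
            (cur, p.1 + st.2, st.2)
          (res.1, res.2.2 - 1)
        else st)
      (gamename_split, 0)).1
    = gamename_split.flatMap (fun gs => (PySem.Str.split? gs ch).getD [gs]) := by
  intro l ch hpre
  rcases hpre with rfl | hch
  · simp [PySem.List.enumerate]
  · have := pv_loop_inv ch hch l [] 0 (by simp)
    simpa using this

-- ===== VERDICT (by name: the statement is the Claim_ definition above) =====
theorem split_on_char_spec : Claim_equal_split_on_char := by
  intro l ch _ hpre
  unfold Spec_split_on_char split_on_char split_on_char_alt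
  exact pv_main l ch hpre
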